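-- pv_equiv track=rewrite | github.com/ilnb/aoc | 25/Day 10/p2.py | cfg_to_mask
-- ===== SOURCE A (Python) =====
-- def cfg_to_mask(s: str):
--     if s.startswith("[") and s.endswith("]"):
--         s = s[1:-1]
--     mask = 0
--     for i, ch in enumerate(s):
--         if ch == '#':
--             mask |= (1 << i)
--     return mask
-- ===== SOURCE B (Python) =====
-- def cfg_to_mask(s: str):
--     if s.startswith("[") and s.endswith("]"):
--         s = s[1:-1]
--
--     def go(t):
--         if len(t) <= 1:
--             return 1 if t == '#' else 0
--         m = len(t) // 2
--         return go(t[:m]) + (go(t[m:]) << m)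
--
--     return go(s)
-- ===== Notes on version B (the rewrite author's own statement) =====
-- stated objective: alternative
-- what changed: Replaces the single indexed shift/OR accumulation loop with a divide-and-conquer recursion: split the string in half, convert each half independently, and combine as lo + (hi << len(lo)).
import Mathlib
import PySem

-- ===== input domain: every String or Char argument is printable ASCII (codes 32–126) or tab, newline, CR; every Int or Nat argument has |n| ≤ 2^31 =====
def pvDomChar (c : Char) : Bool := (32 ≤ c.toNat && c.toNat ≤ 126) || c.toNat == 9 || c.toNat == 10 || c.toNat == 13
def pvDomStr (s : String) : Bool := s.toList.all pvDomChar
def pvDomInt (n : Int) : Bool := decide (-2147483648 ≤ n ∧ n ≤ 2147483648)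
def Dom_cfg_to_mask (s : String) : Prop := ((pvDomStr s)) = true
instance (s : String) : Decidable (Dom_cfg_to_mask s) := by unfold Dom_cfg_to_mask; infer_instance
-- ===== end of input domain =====

-- B replaces A's indexed shift/OR accumulation loop with a divide-and-conquer recursion
-- (split in half, convert halves, combine as lo + (hi << len(lo))); an alternative, not faster.

-- ===== PORT A =====
def cfg_to_mask (s : String) : Int :=
  let t := if PySem.Str.startswith s "[" && PySem.Str.endswith s "]"
           then PySem.Str.slice s (some 1) (some (-1)) else s
  (PySem.List.enumerate t.toList 0).foldl
    (fun mask p => if p.2 = '#' then PySem.Int.bor mask ((1 : Int) <<< p.1.toNat) else mask) 0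

-- ===== PORT B =====
-- the inner helper go(t): divide and conquer on the character list
def pvGo (t : List Char) : Int :=
  if t.length ≤ 1 then (if t = ['#'] then 1 else 0)
  else
    pvGo (t.take (t.length / 2)) + ((pvGo (t.drop (t.length / 2))) <<< (t.length / 2))
termination_by t.length
decreasing_by
  · simp only [List.length_take]; omega
  · simp only [List.length_drop]; omega

def cfg_to_mask_alt (s : String) : Int :=
  let t := if PySem.Str.startswith s "[" && PySem.Str.endswith s "]"
           then PySem.Str.slice s (some 1) (some (-1)) else s
  pvGo t.toList

-- ===== PRECONDITION & SPEC =====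
def Spec_cfg_to_mask (s : String) (out : Int) : Prop := out = cfg_to_mask_alt s
instance (s : String) (out : Int) : Decidable (Spec_cfg_to_mask s out) := by unfold Spec_cfg_to_mask; infer_instance

-- ===== CLAIM (what is proved, stated in full; the proofs are below) =====
def Claim_equal_cfg_to_mask : Prop := ∀ (s : String), Dom_cfg_to_mask s → Spec_cfg_to_mask s (cfg_to_mask s)

-- ===== LEMMAS AND PROOFS =====

-- Horner value of a character list: common characterisation of both ports' results.
def pvHorner (l : List Char) : Int :=
  l.foldr (fun ch m => m * 2 + (if ch = '#' then 1 else 0)) 0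

lemma pvHorner_cons (c : Char) (l : List Char) :
    pvHorner (c :: l) = pvHorner l * 2 + (if c = '#' then 1 else 0) := rfl

lemma pvHorner_append (a b : List Char) :
    pvHorner (a ++ b) = pvHorner a + 2 ^ a.length * pvHorner b := by
  induction a with
  | nil => simp [pvHorner]
  | cons c a ih =>
    simp only [List.cons_append, pvHorner_cons, ih, List.length_cons, pow_succ]
    ring

-- B's divide-and-conquer computes the Horner value (strong induction on the length)
lemma pvGo_eq_horner_aux : ∀ (n : Nat) (l : List Char), l.length ≤ n → pvGo l = pvHorner l := by
  intro n
  induction n with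
  | zero =>
    intro l hl
    have hnil : l = [] := List.length_eq_zero_iff.mp (by omega)
    subst hnil
    rw [pvGo]; simp [pvHorner]
  | succ n ih =>
    intro l hl
    rw [pvGo]
    by_cases h : l.length ≤ 1
    · rw [if_pos h]
      match l, h with
      | [], _ => norm_num [pvHorner]
      | [c], _ =>
        by_cases hc : c = '#'
        · simp [pvHorner, hc]
        · simp [pvHorner, hc]
    · rw [if_neg h]
      rw [Nat.not_le] at h
      have hm : (l.take (l.length / 2)).length = l.length / 2 := by
        simp only [List.length_take]; omega
      rw [ih _ (by simp only [List.length_take]; omega),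
          ih _ (by simp only [List.length_drop]; omega)]
      have happ := pvHorner_append (l.take (l.length / 2)) (l.drop (l.length / 2))
      rw [List.take_append_drop] at happ
      rw [happ, Int.shiftLeft_eq, hm]
      ring

lemma pvGo_eq_horner (l : List Char) : pvGo l = pvHorner l :=
  pvGo_eq_horner_aux l.length l le_rfl

-- a Nat with all bits below i, ORed with 2^i, is just addition
lemma pvLorPow (i m : Nat) (h : m < 2 ^ i) : m ||| 2 ^ i = m + 2 ^ i := by
  apply Nat.eq_of_testBit_eq
  intro k
  rw [Nat.testBit_lor, Nat.add_comm m]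
  rcases lt_trichotomy k i with hk | hk | hk
  · rw [Nat.testBit_two_pow_add_gt hk, Nat.testBit_two_pow_of_ne (by omega)]
    simp
  · subst hk
    rw [Nat.testBit_two_pow_add_eq, Nat.testBit_two_pow_self,
        Nat.testBit_eq_false_of_lt h]
    simp
  · have h2 : 2 ^ i + m < 2 ^ k := by
      have : 2 ^ (i + 1) ≤ 2 ^ k := Nat.pow_le_pow_right (by norm_num) (by omega)
      have : 2 ^ i + 2 ^ i ≤ 2 ^ k := by rw [← Nat.two_mul, ← Nat.pow_succ']; exact this
      omega
    have h3 : m < 2 ^ k := by omega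
    rw [Nat.testBit_eq_false_of_lt h2, Nat.testBit_eq_false_of_lt h3,
        Nat.testBit_two_pow_of_ne (by omega)]
    simp

-- A's OR-with-a-fresh-power step is addition on an accumulator whose bits lie below i
lemma pvBorStep (acc : Int) (i : Nat) (h0 : 0 ≤ acc) (h1 : acc < 2 ^ i) :
    PySem.Int.bor acc ((1 : Int) <<< (((i : Int)).toNat : Int)) = acc + 2 ^ i := by
  obtain ⟨a, rfl⟩ := Int.eq_ofNat_of_zero_le h0
  have ha : a < 2 ^ i := by exact_mod_cast h1
  have hi : ((i : Int)).toNat = i := by simp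
  rw [hi, Int.one_shiftLeft, PySem.Int.bor_natCast, pvLorPow i a ha]
  push_cast; ring

-- A's loop from index i with accumulator acc whose bits lie strictly below i
lemma pvLoopA (l : List Char) (i : Nat) (acc : Int) (h0 : 0 ≤ acc) (h1 : acc < 2 ^ i) :
    (PySem.List.enumerate l (i : Int)).foldl
      (fun mask p => if p.2 = '#' then PySem.Int.bor mask ((1 : Int) <<< p.1.toNat) else mask) acc
    = acc + 2 ^ i * pvHorner l := by
  induction l generalizing i acc with
  | nil => simp [PySem.List.enumerate_nil, pvHorner]
  | cons x l ih =>
    simp only [PySem.List.enumerate_cons, List.foldl_cons]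
    have hcast : ((i : Int) + 1) = ((i + 1 : Nat) : Int) := by push_cast; ring
    split_ifs with hx
    · rw [pvBorStep acc i h0 h1, hcast,
          ih (i + 1) (acc + 2 ^ i) (by positivity) (by rw [pow_succ]; omega),
          pvHorner_cons, if_pos hx]
      ring
    · rw [hcast, ih (i + 1) acc h0 (by rw [pow_succ]; omega),
          pvHorner_cons, if_neg hx]
      ring

-- ===== VERDICT (by name: the statement is the Claim_ definition above) =====
theorem cfg_to_mask_spec : Claim_equal_cfg_to_mask := by
  intro s _
  unfold Spec_cfg_to_mask cfg_to_mask cfg_to_mask_alt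
  rw [pvGo_eq_horner]
  have h := pvLoopA (if PySem.Str.startswith s "[" && PySem.Str.endswith s "]"
      then PySem.Str.slice s (some 1) (some (-1)) else s).toList 0 0 le_rfl (by norm_num)
  simp only [Nat.cast_zero] at h
  rw [h]
  ring
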